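-- pv_equiv track=rewrite | github.com/davidbrochart/pangeo-streamflow | python/misc.py | source_label
-- ===== SOURCE A (Python) =====
-- def source_label(lbls):
--     lbl_list = []
--     for lbl0 in lbls:
--         replaced = False
--         ignore = False
--         for i1, lbl1 in enumerate(lbl_list):
--             if lbl0.startswith(lbl1): # lbl0 is lbl1's source
--                 lbl_list[i1] = lbl0
--                 replaced = True
--                 break
--             if lbl1.startswith(lbl0): # lbl1 is lbl0's source
--                 ignore = True
--                 break
--         if (not replaced) and (not ignore):
--             lbl_list.append(lbl0)
--     return lbl_list
-- ===== SOURCE B (Python) =====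
-- def source_label(lbls):
--     out = []
--     pos = {}      # current label -> its index in out
--     pref = set()  # every proper prefix of a current label
--     for x in lbls:
--         for i in range(len(x)):
--             p = x[:i]
--             if p in pos:              # the unique current label that is a proper prefix of x
--                 j = pos.pop(p)
--                 out[j] = x
--                 pos[x] = j
--                 pref.update(x[:k] for k in range(len(x)))
--                 break
--         else:
--             if x not in pos and x not in pref:
--                 pos[x] = len(out)
--                 out.append(x)
--                 pref.update(x[:k] for k in range(len(x)))
--     return out
-- ===== Notes on version B (the rewrite author's own statement) =====
-- stated objective: faster
-- what changed: Replaces A's inner linear scan over the kept-label list (first entry that is a prefix of, or extends, the new label, via enumerate/break) with hash-indexed lookups: a dict mapping each kept label to its position plus a set of all proper prefixes of kept labels, so each new label is classified by probing its own prefixes in O(L) dict lookups instead of scanning all kept labels.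
import Mathlib
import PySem

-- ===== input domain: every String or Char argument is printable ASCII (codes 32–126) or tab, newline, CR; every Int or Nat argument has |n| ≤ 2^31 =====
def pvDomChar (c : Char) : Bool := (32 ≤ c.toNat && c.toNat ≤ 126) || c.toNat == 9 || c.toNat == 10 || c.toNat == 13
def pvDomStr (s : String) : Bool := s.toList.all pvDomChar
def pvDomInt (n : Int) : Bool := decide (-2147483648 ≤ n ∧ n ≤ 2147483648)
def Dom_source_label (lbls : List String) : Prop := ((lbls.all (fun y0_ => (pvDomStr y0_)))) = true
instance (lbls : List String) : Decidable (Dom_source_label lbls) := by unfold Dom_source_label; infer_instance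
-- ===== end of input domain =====

-- B replaces A's inner scan of the kept list by a position dict plus a proper-prefix set,
-- probing only the new label's own prefixes (objective: faster; same return value).

-- ===== PORT A =====
-- result of A's inner 'for i1, lbl1 in enumerate(lbl_list)' loop:
-- rep l = broke with lbl_list[i1] = lbl0 (l is the updated list), ign = broke with ignore, no = fell through
inductive AScan where
  | rep : List String → AScan
  | ign : AScan
  | no  : AScan

def aScan (x : String) : List String → AScan
  | [] => .no
  | y :: ys =>
    if PySem.Str.startswith x y then .rep (x :: ys)
    else if PySem.Str.startswith y x then .ign
    else
      match aScan x ys with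
      | .rep l => .rep (y :: l)
      | .ign => .ign
      | .no => .no

-- body of A's outer loop
def aStepF (acc : List String) (x : String) : List String :=
  match aScan x acc with
  | .rep l => l
  | .ign => acc
  | .no => acc ++ [x]

def source_label (lbls : List String) : List String :=
  lbls.foldl aStepF []

-- ===== PORT B =====
-- pref.update(x[:k] for k in range(len(x)))
def addPrefs (pref : PySem.Set String) (x : String) : PySem.Set String :=
  (PySem.List.pyRange 0 (PySem.Str.len x)).foldl
    (fun s k => PySem.Set.add s (PySem.Str.slice x none (some k))) pref

-- B's inner 'for i in range(len(x)): p = x[:i]; if p in pos: … break' loop (with its break payload)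
def bFind (x : String) (pos : PySem.Dict String Int) (i : Nat) : Option (String × Int) :=
  if _h : (i : Int) < PySem.Str.len x then
    match PySem.Dict.get? pos (PySem.Str.slice x none (some (i : Int))) with
    | some j => some (PySem.Str.slice x none (some (i : Int)), j)
    | none => bFind x pos (i + 1)
  else none
termination_by x.toList.length - i
decreasing_by simp only [PySem.Str.len_eq] at _h; omega

-- body of B's outer loop over the state (out, pos, pref)
def bStep (st : List String × PySem.Dict String Int × PySem.Set String) (x : String) :
    List String × PySem.Dict String Int × PySem.Set String :=
  match bFind x st.2.1 0 with
  | some (p, j) =>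
      -- j = pos.pop(p); out[j] = x; pos[x] = j  (j is always a valid index, so pySetD is exact here)
      (PySem.List.pySetD st.1 j x, (st.2.1.erase p).insert x j, addPrefs st.2.2 x)
  | none =>
      if st.2.1.contains x || PySem.Set.contains st.2.2 x then st
      else (st.1 ++ [x], st.2.1.insert x ((st.1.length : Int)), addPrefs st.2.2 x)

def source_label_alt (lbls : List String) : List String :=
  (lbls.foldl bStep ([], PySem.Dict.empty, PySem.Set.empty)).1

-- ===== PRECONDITION & SPEC =====
def Spec_source_label (lbls : List String) (out : List String) : Prop := out = source_label_alt lbls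
instance (lbls : List String) (out : List String) : Decidable (Spec_source_label lbls out) := by unfold Spec_source_label; infer_instance

-- ===== CLAIM (what is proved, stated in full; the proofs are below) =====
def Claim_equal_source_label : Prop := ∀ (lbls : List String), Dom_source_label lbls → Spec_source_label lbls (source_label lbls)

-- ===== LEMMAS AND PROOFS =====

-- the loop invariant tying B's state to A's list:
-- out is pairwise prefix-incomparable and duplicate-free, pos maps each kept label to its index,
-- pref holds exactly the proper prefixes of kept labels
def SLInv (out : List String) (pos : PySem.Dict String Int) (pref : PySem.Set String) : Prop :=
  (∀ a ∈ out, ∀ b ∈ out, a ≠ b → ¬ a.toList <+: b.toList) ∧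
  out.Nodup ∧
  (∀ s j, pos.get? s = some j ↔ ∃ k : Nat, j = (k : Int) ∧ out[k]? = some s) ∧
  (∀ p : String, p ∈ pref ↔ ∃ y ∈ out, p.toList <+: y.toList ∧ p ≠ y)

theorem startswith_iff' (x y : String) : (PySem.Str.startswith x y = true) ↔ y.toList <+: x.toList := by
  simp [pysem, PySem.Chars.startswith_iff]

theorem toList_sliceTo (x : String) (i : Nat) :
    (PySem.Str.slice x none (some (i : Int))).toList = x.toList.take i := by
  simp [pysem]

theorem uniq_pre (out : List String)
    (hInc : ∀ a ∈ out, ∀ b ∈ out, a ≠ b → ¬ a.toList <+: b.toList)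
    (x y z : String) (hy : y ∈ out) (hz : z ∈ out)
    (h1 : y.toList <+: x.toList) (h2 : z.toList <+: x.toList) : y = z := by
  by_contra hne
  rcases List.prefix_or_prefix_of_prefix h1 h2 with h | h
  · exact hInc y hy z hz hne h
  · exact hInc z hz y hy (Ne.symm hne) h

theorem aScan_rep (x : String) (out : List String)
    (hInc : ∀ a ∈ out, ∀ b ∈ out, a ≠ b → ¬ a.toList <+: b.toList)
    (hNd : out.Nodup)
    (k : Nat) (y : String) (hk : out[k]? = some y) (hy : y.toList <+: x.toList) :
    aScan x out = .rep (out.set k x) := by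
  induction out generalizing k with
  | nil => simp at hk
  | cons z zs ih =>
    cases k with
    | zero =>
      simp only [List.getElem?_cons_zero, Option.some_inj] at hk
      subst hk
      simp only [aScan]
      rw [if_pos ((startswith_iff' x z).mpr hy)]
      rfl
    | succ k =>
      have hyzs : y ∈ zs := List.mem_of_getElem? hk
      have hznm : z ∉ zs := (List.nodup_cons.mp hNd).1
      have hzy : z ≠ y := fun h => hznm (h ▸ hyzs)
      have hzm : z ∈ z :: zs := List.mem_cons_self
      have hym : y ∈ z :: zs := List.mem_cons_of_mem _ hyzs
      have h1 : ¬ z.toList <+: x.toList := by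
        intro hzx
        rcases List.prefix_or_prefix_of_prefix hzx hy with h | h
        · exact hInc z hzm y hym hzy h
        · exact hInc y hym z hzm hzy.symm h
      have h2 : ¬ x.toList <+: z.toList := by
        intro hxz
        exact hInc y hym z hzm hzy.symm (hy.trans hxz)
      simp only [aScan]
      rw [if_neg (fun hc => h1 ((startswith_iff' _ _).mp hc)),
          if_neg (fun hc => h2 ((startswith_iff' _ _).mp hc)),
          ih (fun a ha b hb => hInc a (List.mem_cons_of_mem _ ha) b (List.mem_cons_of_mem _ hb))
             (List.nodup_cons.mp hNd).2 k hk]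
      rfl

theorem aScan_ign (x : String) (out : List String)
    (h1 : ∀ y ∈ out, ¬ y.toList <+: x.toList)
    (z : String) (hz : z ∈ out) (hxz : x.toList <+: z.toList) :
    aScan x out = .ign := by
  induction out with
  | nil => simp at hz
  | cons w ws ih =>
    simp only [aScan]
    rw [if_neg (fun hc => h1 w List.mem_cons_self ((startswith_iff' _ _).mp hc))]
    by_cases hxw : x.toList <+: w.toList
    · rw [if_pos ((startswith_iff' w x).mpr hxw)]
    · rw [if_neg (fun hc => hxw ((startswith_iff' _ _).mp hc))]
      have hzws : z ∈ ws := by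
        rcases List.mem_cons.mp hz with h | h
        · exact absurd (h ▸ hxz) hxw
        · exact h
      rw [ih (fun y hy => h1 y (List.mem_cons_of_mem _ hy)) hzws]

theorem aScan_no (x : String) (out : List String)
    (h : ∀ y ∈ out, ¬ y.toList <+: x.toList ∧ ¬ x.toList <+: y.toList) :
    aScan x out = .no := by
  induction out with
  | nil => rfl
  | cons w ws ih =>
    simp only [aScan]
    rw [if_neg (fun hc => (h w List.mem_cons_self).1 ((startswith_iff' _ _).mp hc)),
        if_neg (fun hc => (h w List.mem_cons_self).2 ((startswith_iff' _ _).mp hc)),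
        ih (fun y hy => h y (List.mem_cons_of_mem _ hy))]

theorem dict_get?_erase (d : PySem.Dict String Int) (k k' : String) :
    (d.erase k).get? k' = if k' = k then none else d.get? k' := by
  obtain ⟨l⟩ := d
  simp only [PySem.Dict.erase, PySem.Dict.get?]
  split
  · next heq =>
    have hfn : List.find? (fun p => p.1 == k') (List.filter (fun p => !(p.1 == k)) l) = none := by
      rw [List.find?_eq_none]
      intro a ha
      simp only [List.mem_filter, Bool.not_eq_true'] at ha
      simp [heq, ha.2]
    simp [hfn]
  · next hne =>
    induction l with
    | nil => simp
    | cons a l ih =>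
      by_cases h1 : a.1 = k <;> by_cases h2 : a.1 = k' <;>
        simp_all [beq_iff_eq]

theorem mem_addPrefs (pref : PySem.Set String) (x p : String) :
    p ∈ addPrefs pref x ↔ p ∈ pref ∨ (p.toList <+: x.toList ∧ p ≠ x) := by
  unfold addPrefs
  rw [PySem.Set.mem_foldl_add]
  refine or_congr Iff.rfl ?_
  constructor
  · rintro ⟨b, hb, rfl⟩
    rw [PySem.List.mem_pyRange_one, PySem.Str.len_eq] at hb
    have hbn : b = ((b.toNat : Nat) : Int) := by omega
    rw [hbn]
    refine ⟨by rw [toList_sliceTo]; exact List.take_prefix _ _, ?_⟩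
    intro he
    have ht := congrArg String.toList he
    rw [toList_sliceTo] at ht
    have hl := congrArg List.length ht
    simp only [List.length_take] at hl
    omega
  · rintro ⟨hpre, hne⟩
    have htake := List.prefix_iff_eq_take.mp hpre
    have hle := hpre.length_le
    have hlt : p.toList.length < x.toList.length := by
      rcases Nat.lt_or_ge p.toList.length x.toList.length with h | h
      · exact h
      · exact absurd (String.toList_inj.mp (List.IsPrefix.eq_of_length_le hpre h)) hne
    refine ⟨(p.toList.length : Int), ?_, ?_⟩
    · rw [PySem.List.mem_pyRange_one, PySem.Str.len_eq]; omega
    · exact (String.toList_inj.mp (by rw [toList_sliceTo, ← htake])).symm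

theorem bFind_none (x : String) (pos : PySem.Dict String Int) (i : Nat)
    (h : ∀ i', i ≤ i' → i' < x.toList.length →
      pos.get? (PySem.Str.slice x none (some (i' : Int))) = none) :
    bFind x pos i = none := by
  suffices hs : ∀ n i, x.toList.length - i = n →
      (∀ i', i ≤ i' → i' < x.toList.length →
        pos.get? (PySem.Str.slice x none (some (i' : Int))) = none) →
      bFind x pos i = none from hs _ i rfl h
  intro n
  induction n with
  | zero =>
    intro i hfuel _
    rw [bFind, dif_neg (by rw [PySem.Str.len_eq]; omega)]
  | succ n ihn =>
    intro i hfuel hnone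
    rw [bFind]
    by_cases hc : (i : Int) < PySem.Str.len x
    · rw [dif_pos hc]
      rw [PySem.Str.len_eq] at hc
      rw [hnone i le_rfl (by omega)]
      exact ihn (i + 1) (by omega) (fun i' h1 h2 => hnone i' (by omega) h2)
    · rw [dif_neg hc]

theorem bFind_found (x : String) (pos : PySem.Dict String Int) (y : String) (j : Int)
    (hylen : y.toList.length < x.toList.length)
    (hget : pos.get? y = some j)
    (hy : y.toList <+: x.toList)
    (hmin : ∀ i', i' < x.toList.length → ∀ j',
      pos.get? (PySem.Str.slice x none (some (i' : Int))) = some j' → i' = y.toList.length) :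
    bFind x pos 0 = some (y, j) := by
  have hsl : PySem.Str.slice x none (some (y.toList.length : Int)) = y := by
    apply String.toList_inj.mp
    rw [toList_sliceTo]
    exact (List.prefix_iff_eq_take.mp hy).symm
  suffices hs : ∀ n i, y.toList.length - i = n → i ≤ y.toList.length →
      bFind x pos i = some (y, j) from hs _ 0 rfl (Nat.zero_le _)
  intro n
  induction n with
  | zero =>
    intro i hfuel hile
    have hieq : i = y.toList.length := by omega
    subst hieq
    rw [bFind, dif_pos (by rw [PySem.Str.len_eq]; exact_mod_cast hylen), hsl, hget]
  | succ n ihn =>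
    intro i hfuel hile
    have hilt : i < y.toList.length := by omega
    rw [bFind, dif_pos (by rw [PySem.Str.len_eq]; exact_mod_cast (by omega : i < x.toList.length))]
    cases hg : pos.get? (PySem.Str.slice x none (some (i : Int))) with
    | some j' => exact absurd (hmin i (by omega) j' hg) (by omega)
    | none => exact ihn (i + 1) (by omega) (by omega)

theorem nodup_idx (l : List String) (h : l.Nodup) {k n : Nat} {y : String}
    (h1 : l[k]? = some y) (h2 : l[n]? = some y) : k = n := by
  obtain ⟨hk, e1⟩ := List.getElem?_eq_some_iff.mp h1
  obtain ⟨hn, e2⟩ := List.getElem?_eq_some_iff.mp h2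
  exact (List.Nodup.getElem_inj_iff h).mp (e1.trans e2.symm)

theorem mem_set_cases {l : List String} {k : Nat} {y x a : String} (hNd : l.Nodup)
    (hk : l[k]? = some y) (ha : a ∈ l.set k x) : a = x ∨ (a ∈ l ∧ a ≠ y) := by
  obtain ⟨n, hn⟩ := List.mem_iff_getElem?.mp ha
  rw [List.getElem?_set] at hn
  by_cases hkn : k = n
  · rw [if_pos hkn] at hn
    split at hn
    · exact Or.inl (Option.some_inj.mp hn).symm
    · exact absurd hn (by simp)
  · rw [if_neg hkn] at hn
    refine Or.inr ⟨List.mem_of_getElem? hn, fun hay => hkn (nodup_idx l hNd hk (hay ▸ hn))⟩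

theorem mem_set_of_ne {l : List String} {k : Nat} {y x z : String}
    (hz : z ∈ l) (hne : z ≠ y) (hk : l[k]? = some y) : z ∈ l.set k x := by
  obtain ⟨n, hn⟩ := List.mem_iff_getElem?.mp hz
  have hkn : k ≠ n := fun h => hne (Option.some_inj.mp (hn.symm.trans (h ▸ hk)))
  have hget : (l.set k x)[n]? = some z := by rw [List.getElem?_set, if_neg hkn]; exact hn
  exact List.mem_of_getElem? hget

theorem getElem?_concat (l : List String) (x : String) (n : Nat) :
    (l ++ [x])[n]? = if n = l.length then some x else l[n]? := by
  rcases Nat.lt_trichotomy n l.length with h | h | h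
  · rw [List.getElem?_append_left h, if_neg (by omega)]
  · subst h
    rw [List.getElem?_append_right le_rfl, if_pos rfl]
    simp
  · rw [List.getElem?_append_right (by omega), if_neg (by omega)]
    have h1 : (n - l.length) ≠ 0 := by omega
    rcases Nat.exists_eq_succ_of_ne_zero h1 with ⟨m, hm⟩
    rw [hm]
    simp [List.getElem?_eq_none (by omega : l.length ≤ n)]

theorem str_plen {y x : String} (hp : y.toList <+: x.toList) (hne : y ≠ x) :
    y.toList.length < x.toList.length := by
  rcases Nat.lt_or_ge y.toList.length x.toList.length with h | h
  · exact h
  · exact absurd (String.toList_inj.mp (List.IsPrefix.eq_of_length_le hp h)) hne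

theorem step_main (out : List String) (pos : PySem.Dict String Int) (pref : PySem.Set String)
    (x : String) (h : SLInv out pos pref) :
    (bStep (out, pos, pref) x).1 = aStepF out x ∧
      SLInv (bStep (out, pos, pref) x).1 (bStep (out, pos, pref) x).2.1 (bStep (out, pos, pref) x).2.2 := by
  obtain ⟨hInc, hNd, hPos, hPref⟩ := h
  by_cases hC1 : ∃ y ∈ out, y.toList <+: x.toList
  · obtain ⟨y, hy, hyx⟩ := hC1
    obtain ⟨k, hk⟩ := List.getElem?_of_mem hy
    have hkl : k < out.length := (List.getElem?_eq_some_iff.mp hk).1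
    have hA : aStepF out x = out.set k x := by
      unfold aStepF; rw [aScan_rep x out hInc hNd k y hk hyx]
    have huniq : ∀ z ∈ out, z.toList <+: x.toList → z = y :=
      fun z hz hzx => uniq_pre out hInc x z y hz hy hzx hyx
    by_cases hxy : y = x
    · -- x itself is already kept: A's replacement is a no-op, B skips (x ∈ pos)
      have hset : out.set k x = out := by
        apply List.ext_getElem?
        intro n
        rw [List.getElem?_set]
        split
        · next hkn => rw [← hkn, hk, hxy]
        · rfl
      have hbf : bFind x pos 0 = none := by
        apply bFind_none
        intro i' _ hi'
        cases hg : pos.get? (PySem.Str.slice x none (some (i' : Int))) with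
        | none => rfl
        | some j' =>
          obtain ⟨k', _, hk2⟩ := (hPos _ _).mp hg
          have hpre : (PySem.Str.slice x none (some (i' : Int))).toList <+: x.toList := by
            rw [toList_sliceTo]; exact List.take_prefix _ _
          have heq := huniq _ (List.mem_of_getElem? hk2) hpre
          have hlen := congrArg (fun s : String => s.toList.length) heq
          simp only [toList_sliceTo, List.length_take] at hlen
          rw [hxy] at hlen
          omega
      have hgx : pos.get? x = some (k : Int) := (hPos x _).mpr ⟨k, rfl, hxy ▸ hk⟩
      have hcont : pos.contains x = true := by
        rw [PySem.Dict.contains_eq_isSome_get?, hgx]; rfl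
      have hst : bStep (out, pos, pref) x = (out, pos, pref) := by
        unfold bStep
        rw [hbf]
        simp only [hcont, Bool.true_or, if_pos]
      rw [hst, hA, hset]
      exact ⟨rfl, hInc, hNd, hPos, hPref⟩
    · -- a strictly shorter kept label y is replaced by x
      have hylen : y.toList.length < x.toList.length := str_plen hyx hxy
      have hgety : pos.get? y = some (k : Int) := (hPos y _).mpr ⟨k, rfl, hk⟩
      have hmin : ∀ i', i' < x.toList.length → ∀ j',
          pos.get? (PySem.Str.slice x none (some (i' : Int))) = some j' → i' = y.toList.length := by
        intro i' hi' j' hg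
        obtain ⟨k', _, hk2⟩ := (hPos _ _).mp hg
        have hpre : (PySem.Str.slice x none (some (i' : Int))).toList <+: x.toList := by
          rw [toList_sliceTo]; exact List.take_prefix _ _
        have heq := huniq _ (List.mem_of_getElem? hk2) hpre
        have hlen := congrArg (fun s : String => s.toList.length) heq
        simp only [toList_sliceTo, List.length_take] at hlen
        omega
      have hbf : bFind x pos 0 = some (y, (k : Int)) :=
        bFind_found x pos y (k : Int) hylen hgety hyx hmin
      have hxnm : x ∉ out := fun hxm => hxy (huniq x hxm (List.prefix_refl _)).symm
      have hst : bStep (out, pos, pref) x =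
          (out.set k x, (pos.erase y).insert x (k : Int), addPrefs pref x) := by
        unfold bStep
        rw [hbf]
        simp only [PySem.List.pySetD_natCast]
      rw [hst, hA]
      refine ⟨rfl, ?_, List.Nodup.set hNd hxnm, ?_, ?_⟩
      · -- pairwise incomparability
        intro a ha b hb hab
        rcases mem_set_cases hNd hk ha with rfl | ⟨ha1, ha2⟩
        · rcases mem_set_cases hNd hk hb with rfl | ⟨hb1, hb2⟩
          · exact absurd rfl hab
          · intro hpx
            exact hInc y hy b hb1 (Ne.symm hb2) (hyx.trans hpx)
        · rcases mem_set_cases hNd hk hb with rfl | ⟨hb1, hb2⟩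
          · intro hpx
            exact ha2 (huniq a ha1 hpx)
          · exact hInc a ha1 b hb1 hab
      · -- position dict
        intro s j
        rw [PySem.Dict.get?_insert, dict_get?_erase]
        by_cases hsx : s = x
        · subst hsx
          rw [if_pos rfl]
          constructor
          · rintro h
            exact ⟨k, (Option.some_inj.mp h).symm, by rw [List.getElem?_set, if_pos rfl, if_pos hkl]⟩
          · rintro ⟨k', rfl, hk2⟩
            rw [List.getElem?_set] at hk2
            by_cases hkk : k = k'
            · rw [hkk]
            · rw [if_neg hkk] at hk2
              exact absurd (List.mem_of_getElem? hk2) hxnm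
        · rw [if_neg hsx]
          by_cases hsy : s = y
          · subst hsy
            rw [if_pos rfl]
            constructor
            · rintro h
              exact absurd h (by simp)
            · rintro ⟨k', rfl, hk2⟩
              rw [List.getElem?_set] at hk2
              by_cases hkk : k = k'
              · rw [if_pos hkk, if_pos hkl] at hk2
                exact absurd (Option.some_inj.mp hk2) (fun h => hsx h.symm)
              · rw [if_neg hkk] at hk2
                exact absurd (nodup_idx out hNd hk2 hk) (fun h => hkk h.symm)
          · rw [if_neg hsy, hPos s j]
            constructor
            · rintro ⟨k', rfl, hk2⟩
              refine ⟨k', rfl, ?_⟩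
              have hkk : k ≠ k' := fun h => hsy (Option.some_inj.mp ((h ▸ hk).symm.trans hk2)).symm
              rw [List.getElem?_set, if_neg hkk]
              exact hk2
            · rintro ⟨k', rfl, hk2⟩
              rw [List.getElem?_set] at hk2
              by_cases hkk : k = k'
              · rw [if_pos hkk, if_pos hkl] at hk2
                exact absurd (Option.some_inj.mp hk2) (fun h => hsx h.symm)
              · rw [if_neg hkk] at hk2
                exact ⟨k', rfl, hk2⟩
      · -- prefix set
        intro p
        rw [mem_addPrefs, hPref p]
        constructor
        · rintro (⟨z, hz, hpz, hpzne⟩ | ⟨hpx, hpxne⟩)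
          · by_cases hzy : z = y
            · subst hzy
              have hplen : p.toList.length < z.toList.length := str_plen hpz hpzne
              refine ⟨x, List.mem_set hkl x, hpz.trans hyx, ?_⟩
              intro hpxx
              have := congrArg (fun s : String => s.toList.length) hpxx
              simp only at this
              omega
            · exact ⟨z, mem_set_of_ne hz hzy hk, hpz, hpzne⟩
          · exact ⟨x, List.mem_set hkl x, hpx, hpxne⟩
        · rintro ⟨z, hzs, hpz, hpzne⟩
          rcases mem_set_cases hNd hk hzs with rfl | ⟨hz1, hz2⟩
          · exact Or.inr ⟨hpz, hpzne⟩
          · exact Or.inl ⟨z, hz1, hpz, hpzne⟩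
  · -- no kept label is a prefix of x
    simp only [not_exists, not_and] at hC1
    have hxnm : x ∉ out := fun hm => hC1 x hm (List.prefix_refl _)
    have hbf : bFind x pos 0 = none := by
      apply bFind_none
      intro i' _ hi'
      cases hg : pos.get? (PySem.Str.slice x none (some (i' : Int))) with
      | none => rfl
      | some j' =>
        obtain ⟨k', _, hk2⟩ := (hPos _ _).mp hg
        have hpre : (PySem.Str.slice x none (some (i' : Int))).toList <+: x.toList := by
          rw [toList_sliceTo]; exact List.take_prefix _ _
        exact absurd hpre (hC1 _ (List.mem_of_getElem? hk2))
    have hcont : pos.contains x = false := by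
      rw [PySem.Dict.contains_eq_isSome_get?]
      cases hg : pos.get? x with
      | none => rfl
      | some j =>
        obtain ⟨k', _, hk2⟩ := (hPos _ _).mp hg
        exact absurd (List.mem_of_getElem? hk2) hxnm
    by_cases hC2 : ∃ z ∈ out, x.toList <+: z.toList
    · obtain ⟨z, hz, hxz⟩ := hC2
      have hA : aStepF out x = out := by
        unfold aStepF; rw [aScan_ign x out (fun y hy => hC1 y hy) z hz hxz]
      have hxz' : x ≠ z := fun h => hxnm (h ▸ hz)
      have hmem : x ∈ pref := (hPref x).mpr ⟨z, hz, hxz, hxz'⟩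
      have hcontp : PySem.Set.contains pref x = true := (PySem.Set.contains_iff pref x).mpr hmem
      have hst : bStep (out, pos, pref) x = (out, pos, pref) := by
        unfold bStep
        rw [hbf]
        simp only [hcont, hcontp, Bool.false_or, if_pos]
      rw [hst, hA]
      exact ⟨rfl, hInc, hNd, hPos, hPref⟩
    · simp only [not_exists, not_and] at hC2
      have hA : aStepF out x = out ++ [x] := by
        unfold aStepF
        rw [aScan_no x out (fun y hy => ⟨hC1 y hy, hC2 y hy⟩)]
      have hcontp : PySem.Set.contains pref x = false := by
        cases hcp : PySem.Set.contains pref x with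
        | false => rfl
        | true =>
          obtain ⟨z, hz, hxz, _⟩ := (hPref x).mp ((PySem.Set.contains_iff pref x).mp hcp)
          exact absurd hxz (hC2 z hz)
      have hst : bStep (out, pos, pref) x =
          (out ++ [x], pos.insert x ((out.length : Int)), addPrefs pref x) := by
        unfold bStep
        rw [hbf]
        simp only [hcont, hcontp, Bool.or_self, Bool.false_eq_true, if_false]
      rw [hst, hA]
      refine ⟨rfl, ?_, ?_, ?_, ?_⟩
      · intro a ha b hb hab
        rcases List.mem_append.mp ha with ha' | ha' <;>
          rcases List.mem_append.mp hb with hb' | hb'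
        · exact hInc a ha' b hb' hab
        · rw [List.mem_singleton] at hb'
          subst hb'
          exact hC1 a ha'
        · rw [List.mem_singleton] at ha'
          subst ha'
          exact hC2 b hb'
        · rw [List.mem_singleton] at ha' hb'
          exact absurd (ha'.trans hb'.symm) hab
      · rw [List.nodup_append]
        refine ⟨hNd, List.nodup_singleton x, fun a ha b hb hab => ?_⟩
        rw [hab, List.mem_singleton.mp hb] at ha
        exact hxnm ha
      · intro s j
        rw [PySem.Dict.get?_insert]
        by_cases hsx : s = x
        · subst hsx
          rw [if_pos rfl]
          constructor
          · rintro h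
            exact ⟨out.length, (Option.some_inj.mp h).symm,
              by rw [getElem?_concat, if_pos rfl]⟩
          · rintro ⟨k', rfl, hk2⟩
            rw [getElem?_concat] at hk2
            by_cases hkk : k' = out.length
            · rw [hkk]
            · rw [if_neg hkk] at hk2
              exact absurd (List.mem_of_getElem? hk2) hxnm
        · rw [if_neg hsx, hPos s j]
          constructor
          · rintro ⟨k', rfl, hk2⟩
            refine ⟨k', rfl, ?_⟩
            rw [getElem?_concat, if_neg ?_]
            · exact hk2
            · intro hkk
              rw [hkk] at hk2
              exact absurd hk2 (by simp)
          · rintro ⟨k', rfl, hk2⟩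
            rw [getElem?_concat] at hk2
            by_cases hkk : k' = out.length
            · rw [if_pos hkk] at hk2
              exact absurd (Option.some_inj.mp hk2) (fun h => hsx h.symm)
            · rw [if_neg hkk] at hk2
              exact ⟨k', rfl, hk2⟩
      · intro p
        rw [mem_addPrefs, hPref p]
        constructor
        · rintro (⟨z, hz, hpz, hpzne⟩ | ⟨hpx, hpxne⟩)
          · exact ⟨z, List.mem_append_left _ hz, hpz, hpzne⟩
          · exact ⟨x, List.mem_append_right _ (List.mem_singleton.mpr rfl), hpx, hpxne⟩
        · rintro ⟨z, hzs, hpz, hpzne⟩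
          rcases List.mem_append.mp hzs with hz' | hz'
          · exact Or.inl ⟨z, hz', hpz, hpzne⟩
          · rw [List.mem_singleton] at hz'
            subst hz'
            exact Or.inr ⟨hpz, hpzne⟩

theorem loop_eq (lbls : List String) :
    ∀ out pos pref, SLInv out pos pref →
      (lbls.foldl bStep (out, pos, pref)).1 = lbls.foldl aStepF out := by
  induction lbls with
  | nil => intro out pos pref _; rfl
  | cons x xs ih =>
    intro out pos pref h
    obtain ⟨hfst, hinv⟩ := step_main out pos pref x h
    simp only [List.foldl_cons]
    rw [show bStep (out, pos, pref) x =
      ((bStep (out, pos, pref) x).1, (bStep (out, pos, pref) x).2.1, (bStep (out, pos, pref) x).2.2) from rfl]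
    rw [ih _ _ _ hinv, hfst]

theorem Inv_empty : SLInv [] PySem.Dict.empty PySem.Set.empty := by
  refine ⟨by simp, by simp, ?_, by simp [PySem.Set.empty]⟩
  intro s j
  simp [PySem.Dict.get?_empty]

-- ===== VERDICT (by name: the statement is the Claim_ definition above) =====
theorem source_label_spec : Claim_equal_source_label := by
  intro lbls _
  unfold Spec_source_label source_label source_label_alt
  exact (loop_eq lbls [] PySem.Dict.empty PySem.Set.empty Inv_empty).symm
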